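-- pv_equiv track=rewrite | github.com/automl/multi-obj-baselines | baselines/methods/bulkandcut/plot/pareto.py | _phase_transitions
-- ===== SOURCE A (Python) =====
-- def _phase_transitions(population):
--     first_bulkup, first_slimdown = -1, -1
--     for n, ind in enumerate(population):
--         if first_bulkup == -1 and ind["n_bulks"] > 0:
--             first_bulkup = n
--         if ind["n_cuts"] > 0:
--             first_slimdown = n
--             break
--     return first_bulkup, first_slimdown
-- ===== SOURCE B (Python) =====
-- def _phase_transitions(population):
--     first_slimdown = next(
--         (n for n, ind in enumerate(population) if ind["n_cuts"] > 0), -1)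
--     limit = len(population) if first_slimdown == -1 else first_slimdown + 1
--     first_bulkup = next(
--         (n for n, ind in enumerate(population[:limit]) if ind["n_bulks"] > 0), -1)
--     return first_bulkup, first_slimdown
-- ===== Notes on version B (the rewrite author's own statement) =====
-- stated objective: alternative
-- what changed: A's single interleaved loop with shared state and break is replaced by two independent find-first scans: first locate the first slimdown, then search for the first bulkup only within the prefix ending at that index (or the whole list if none).
import Mathlib
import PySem

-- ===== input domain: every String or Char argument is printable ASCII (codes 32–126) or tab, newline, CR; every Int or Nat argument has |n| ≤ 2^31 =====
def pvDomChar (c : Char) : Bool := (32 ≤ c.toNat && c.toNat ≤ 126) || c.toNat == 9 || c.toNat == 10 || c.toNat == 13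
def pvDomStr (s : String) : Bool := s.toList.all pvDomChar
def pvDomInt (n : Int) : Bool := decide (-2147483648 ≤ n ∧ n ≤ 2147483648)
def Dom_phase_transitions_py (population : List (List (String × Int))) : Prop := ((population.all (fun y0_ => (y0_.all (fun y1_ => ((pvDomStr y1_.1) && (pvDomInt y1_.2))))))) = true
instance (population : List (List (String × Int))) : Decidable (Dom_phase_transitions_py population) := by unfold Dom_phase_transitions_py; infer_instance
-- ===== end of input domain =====

-- B replaces A's single interleaved loop (shared break) by two separately bounded
-- find-first scans: a genuinely different decomposition, same cost (objective: alternative).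

-- dict lookup ind[key] (first match); the 0 default is never used inside Pre_ (keys present)
def pvLook (ind : List (String × Int)) (key : String) : Int :=
  ((PySem.Dict.mk ind).get? key).getD 0

-- ===== PORT A =====
def pvGoA : List (List (String × Int)) → Int → Int → Int → Int × Int
  | [], _, fb, fs => (fb, fs)
  | ind :: rest, n, fb, fs =>
    let fb' := if fb = -1 ∧ pvLook ind "n_bulks" > 0 then n else fb
    if pvLook ind "n_cuts" > 0 then (fb', n)
    else pvGoA rest (n + 1) fb' fs

def phase_transitions_py (population : List (List (String × Int))) : Int × Int :=
  pvGoA population 0 (-1) (-1)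

-- ===== PORT B =====
-- next((n for n, ind in enumerate(pop) if ind[key] > 0), -1), starting the counter at n
def pvFindFirst (key : String) : List (List (String × Int)) → Int → Int
  | [], _ => -1
  | ind :: rest, n => if pvLook ind key > 0 then n else pvFindFirst key rest (n + 1)

def phase_transitions_py_alt (population : List (List (String × Int))) : Int × Int :=
  let first_slimdown := pvFindFirst "n_cuts" population 0
  let limit : Int := if first_slimdown = -1 then (population.length : Int) else first_slimdown + 1
  let first_bulkup := pvFindFirst "n_bulks" (PySem.List.slice population none (some limit)) 0
  (first_bulkup, first_slimdown)

-- ===== PRECONDITION & SPEC =====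
-- ind has a positive "n_cuts" (resp. "n_bulks") value
def pvCutP (ind : List (String × Int)) : Bool :=
  match (PySem.Dict.mk ind).get? "n_cuts" with | some v => decide (v > 0) | none => false
def pvBulkP (ind : List (String × Int)) : Bool :=
  match (PySem.Dict.mk ind).get? "n_bulks" with | some v => decide (v > 0) | none => false

-- Pre_ excludes exactly the inputs where A raises KeyError: every individual before the
-- first positive-"n_cuts" one (inclusive) must carry the "n_cuts" key, and also the
-- "n_bulks" key as long as no earlier individual had a positive "n_bulks" value.
def Pre_phase_transitions_py (population : List (List (String × Int))) : Prop :=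
  ∀ i, (h : i < population.length) →
    ((population.take i).all (fun ind => !pvCutP ind) = true) →
    ((PySem.Dict.mk population[i]).contains "n_cuts" = true ∧
      (((population.take i).all (fun ind => !pvBulkP ind) = true) →
        (PySem.Dict.mk population[i]).contains "n_bulks" = true))
instance (population : List (List (String × Int))) : Decidable (Pre_phase_transitions_py population) := by unfold Pre_phase_transitions_py; infer_instance

def pvWitness_phase_transitions_py : (List (List (String × Int))) :=
  [[("n_bulks", 1), ("n_cuts", 0)], [("n_bulks", 0), ("n_cuts", 2)]]

def Spec_phase_transitions_py (population : List (List (String × Int))) (out : Int × Int) : Prop := out = phase_transitions_py_alt population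
instance (population : List (List (String × Int))) (out : Int × Int) : Decidable (Spec_phase_transitions_py population out) := by unfold Spec_phase_transitions_py; infer_instance

-- ===== CLAIM (what is proved, stated in full; the proofs are below) =====
def Claim_equal_phase_transitions_py : Prop := ∀ (population : List (List (String × Int))), Dom_phase_transitions_py population → Pre_phase_transitions_py population → Spec_phase_transitions_py population (phase_transitions_py population)

-- ===== LEMMAS AND PROOFS =====

-- pvFindFirst either fails (-1) or returns an index ≥ its starting counter
theorem pvFindFirst_ge (key : String) (pop : List (List (String × Int))) (n : Int) :
    pvFindFirst key pop n = -1 ∨ n ≤ pvFindFirst key pop n := by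
  induction pop generalizing n with
  | nil => left; rfl
  | cons ind rest ih =>
    simp only [pvFindFirst]
    split
    · right; omega
    · rcases ih (n + 1) with h | h
      · left; exact h
      · right; omega

-- once first_bulkup is set, A's loop only searches for the first cut
theorem pvGoA_fbset (pop : List (List (String × Int))) (n fb : Int) (h : fb ≠ -1) :
    pvGoA pop n fb (-1) = (fb, pvFindFirst "n_cuts" pop n) := by
  induction pop generalizing n with
  | nil => rfl
  | cons ind rest ih =>
    simp only [pvGoA, pvFindFirst, h, false_and, if_false]
    split
    · rfl
    · exact ih (n + 1)

-- main invariant: A's loop from counter n equals B's two scans restricted to the window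
theorem pvGoA_main (pop : List (List (String × Int))) (n : Int) (hn : 0 ≤ n) :
    pvGoA pop n (-1) (-1) =
      (pvFindFirst "n_bulks"
        (pop.take (if pvFindFirst "n_cuts" pop n = -1 then pop.length
                   else (pvFindFirst "n_cuts" pop n + 1 - n).toNat)) n,
       pvFindFirst "n_cuts" pop n) := by
  induction pop generalizing n with
  | nil => simp [pvGoA, pvFindFirst]
  | cons ind rest ih =>
    by_cases hc : pvLook ind "n_cuts" > 0
    · have hne : n ≠ -1 := by omega
      simp only [pvGoA, pvFindFirst, hc, if_true, hne, if_false]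
      have h1 : (n + 1 - n).toNat = 1 := by omega
      rw [h1]
      simp only [List.take_succ_cons, List.take_zero, pvFindFirst]
      by_cases hb : pvLook ind "n_bulks" > 0 <;> simp [hb]
    · have hrest := pvFindFirst_ge "n_cuts" rest (n + 1)
      simp only [pvGoA, pvFindFirst, hc, if_false]
      by_cases hb : pvLook ind "n_bulks" > 0
      · rw [if_pos ⟨trivial, hb⟩]
        rw [pvGoA_fbset rest (n + 1) n (by omega)]
        -- window contains the head, whose bulks fire
        have htk : (if pvFindFirst "n_cuts" rest (n + 1) = -1 then (ind :: rest).length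
                    else (pvFindFirst "n_cuts" rest (n + 1) + 1 - n).toNat) ≠ 0 := by
          split
          · simp
          · omega
        rcases Nat.exists_eq_succ_of_ne_zero htk with ⟨k, hk⟩
        rw [hk]
        simp only [List.take_succ_cons, pvFindFirst, hb, if_pos]
      · rw [if_neg (fun h => hb h.2)]
        rw [ih (n + 1) (by omega)]
        congr 1
        by_cases h1 : pvFindFirst "n_cuts" rest (n + 1) = -1
        · simp [h1, pvFindFirst, hb]
        · have hge : n + 1 ≤ pvFindFirst "n_cuts" rest (n + 1) := by
            rcases hrest with h | h
            · exact absurd h h1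
            · exact h
          have h2 : (pvFindFirst "n_cuts" rest (n + 1) + 1 - n).toNat =
              (pvFindFirst "n_cuts" rest (n + 1) + 1 - (n + 1)).toNat + 1 := by omega
          simp only [h1, if_false, h2, List.take_succ_cons, pvFindFirst, hb, if_false]

-- ===== VERDICT (by name: the statement is the Claim_ definition above) =====
theorem phase_transitions_py_spec : Claim_equal_phase_transitions_py := by
  intro population _ _
  unfold Spec_phase_transitions_py phase_transitions_py phase_transitions_py_alt
  dsimp only
  rw [pvGoA_main population 0 le_rfl]
  have hlim : (0 : Int) ≤ (if pvFindFirst "n_cuts" population 0 = -1 then ((population.length : Int))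
      else pvFindFirst "n_cuts" population 0 + 1) := by
    rcases pvFindFirst_ge "n_cuts" population 0 with h | h <;> split <;> omega
  rw [PySem.List.slice_to _ hlim]
  congr 2
  split <;> simp
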